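-- pv_equiv track=rewrite | github.com/omoinjm/njmtech-knowledge-base | apps/upload-blob/api/runtime/blob_client.py | _sanitize_path_segment
-- ===== SOURCE A (Python) =====
-- def _sanitize_path_segment(segment: str) -> str:
--     cleaned = []
--     last_was_sep = False
--     for char in (segment or ""):
--         if char.isalnum() or char in {".", "_", "-"}:
--             cleaned.append(char)
--             last_was_sep = False
--         else:
--             if not last_was_sep:
--                 cleaned.append("_")
--                 last_was_sep = True
--     sanitized = "".join(cleaned).strip("._-")
--     return sanitized
-- ===== SOURCE B (Python) =====
-- def _is_valid(ch: str) -> bool: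
--     return ch.isalnum() or ch in "._-"
--
--
-- def _sanitize_path_segment(segment: str) -> str:
--     seg = segment or ""
--     runs = []
--     i = 0
--     n = len(seg)
--     while i < n:
--         if _is_valid(seg[i]):
--             j = i
--             while j < n and _is_valid(seg[j]):
--                 j += 1
--             runs.append(seg[i:j])
--             i = j
--         else:
--             i += 1
--     return "_".join(runs).strip("._-")
-- ===== Notes on version B (the rewrite author's own statement) =====
-- stated objective: alternative
-- what changed: Replaces the flag-tracking single pass (append char or a collapsed separator depending on a last_was_sep flag) by a two-pointer scan that collects the maximal runs of valid characters and joins them with an underscore before the same strip.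
import Mathlib
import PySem

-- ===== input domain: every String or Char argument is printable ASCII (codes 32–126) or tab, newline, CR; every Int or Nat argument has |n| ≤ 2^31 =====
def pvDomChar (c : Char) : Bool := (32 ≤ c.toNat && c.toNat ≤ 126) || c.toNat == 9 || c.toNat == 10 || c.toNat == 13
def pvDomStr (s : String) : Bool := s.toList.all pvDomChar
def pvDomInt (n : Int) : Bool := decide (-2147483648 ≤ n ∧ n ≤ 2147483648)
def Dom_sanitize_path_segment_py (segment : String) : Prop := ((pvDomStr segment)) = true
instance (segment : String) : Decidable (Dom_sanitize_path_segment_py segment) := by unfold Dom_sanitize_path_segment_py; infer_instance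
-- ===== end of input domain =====

-- B replaces A's last_was_sep flag pass by collecting maximal valid runs and joining them with an underscore (alternative decomposition, same cost).

-- shared character predicate (both Pythons test `c.isalnum() or c in "._-"`)
def pvValid (c : Char) : Bool :=
  PySem.Chars.isalnum c || (c == '.' || c == '_' || c == '-')

-- ===== PORT A =====
-- loop body of A's `for char in segment:`; state = (cleaned, last_was_sep)
def pvStepA (st : List Char × Bool) (c : Char) : List Char × Bool :=
  if pvValid c then (st.1 ++ [c], false)
  else if st.2 = false then (st.1 ++ ['_'], true)
  else st

def sanitize_path_segment_py (segment : String) : String :=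
  let r := segment.toList.foldl pvStepA ([], false)
  String.ofList (PySem.Chars.stripChars r.1 ['.', '_', '-'])

-- ===== PORT B =====
-- B's outer while loop; the inner `while j < n and valid(seg[j])` scan plus the
-- slice seg[i:j] is ported as takeWhile/dropWhile (the same left-to-right scan).
def pvRunsB (cs : List Char) : List (List Char) :=
  match cs with
  | [] => []
  | c :: t =>
    if pvValid c then
      (c :: t.takeWhile pvValid) :: pvRunsB (t.dropWhile pvValid)
    else pvRunsB t
termination_by cs.length
decreasing_by
  · exact Nat.lt_succ_of_le (List.length_dropWhile_le pvValid t)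
  · simp

def sanitize_path_segment_py_alt (segment : String) : String :=
  String.ofList (PySem.Chars.stripChars
    (PySem.Chars.join ['_'] (pvRunsB segment.toList)) ['.', '_', '-'])

-- ===== PRECONDITION & SPEC =====
def Spec_sanitize_path_segment_py (segment : String) (out : String) : Prop := out = sanitize_path_segment_py_alt segment
instance (segment : String) (out : String) : Decidable (Spec_sanitize_path_segment_py segment out) := by unfold Spec_sanitize_path_segment_py; infer_instance

-- ===== CLAIM (what is proved, stated in full; the proofs are below) =====
def Claim_equal_sanitize_path_segment_py : Prop := ∀ (segment : String), Dom_sanitize_path_segment_py segment → Spec_sanitize_path_segment_py segment (sanitize_path_segment_py segment)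

-- ===== LEMMAS AND PROOFS =====
-- A's loop, written as an accumulator-free recursion on the characters
def pvGA : List Char → Bool → List Char × Bool
  | [], b => ([], b)
  | c :: t, b =>
    if pvValid c then
      ((pvGA t false).1.cons c, (pvGA t false).2)
    else if b then pvGA t true
    else ((pvGA t true).1.cons '_', (pvGA t true).2)

def pvHeadU (cs : List Char) : List Char :=
  match cs with
  | [] => []
  | c :: _ => if pvValid c then [] else ['_']

def pvEndsInvalid (cs : List Char) : Bool :=
  match cs.getLast? with
  | none => false
  | some c => !pvValid c

def pvTailU (cs : List Char) : List Char :=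
  if pvRunsB cs = [] then [] else if pvEndsInvalid cs then ['_'] else []

theorem pv_foldA (cs : List Char) : ∀ (acc : List Char) (b : Bool),
    cs.foldl pvStepA (acc, b) = (acc ++ (pvGA cs b).1, (pvGA cs b).2) := by
  induction cs with
  | nil => intro acc b; simp [pvGA]
  | cons c t ih =>
    intro acc b
    by_cases h : pvValid c = true
    · simp [pvStepA, pvGA, h, ih]
    · cases b <;> simp [pvStepA, pvGA, h, ih]

theorem pv_F (cs : List Char) :
    (pvGA cs false).1 = pvHeadU cs ++ (pvGA cs true).1 := by
  match cs with
  | [] => simp [pvGA, pvHeadU]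
  | c :: t =>
    by_cases h : pvValid c = true <;> simp [pvGA, pvHeadU, h]

theorem pv_run (t : List Char) :
    (pvGA t false).1 = t.takeWhile pvValid ++ (pvGA (t.dropWhile pvValid) false).1 := by
  induction t with
  | nil => simp
  | cons c t ih =>
    by_cases h : pvValid c = true
    · simp [pvGA, h, ih]
    · simp [h]

theorem pv_runs_nil (cs : List Char) :
    pvRunsB cs = [] ↔ ∀ c ∈ cs, pvValid c = false := by
  induction cs with
  | nil => simp [pvRunsB]
  | cons c t ih =>
    by_cases h : pvValid c = true
    · simp [pvRunsB, h]
    · simp [pvRunsB, h, ih]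

theorem pv_ends_of_suffix (cs t : List Char) (hs : t <:+ cs) (h : t ≠ []) :
    pvEndsInvalid cs = pvEndsInvalid t := by
  obtain ⟨u, rfl⟩ := hs
  obtain ⟨a, e⟩ : ∃ a, t.getLast? = some a := by
    cases e : t.getLast? with
    | none => exact absurd (List.getLast?_eq_none_iff.mp e) h
    | some a => exact ⟨a, rfl⟩
  simp [pvEndsInvalid, List.getLast?_append, e]

theorem pv_ends_of_all (cs : List Char) (h : ∀ x ∈ cs, pvValid x = true) :
    pvEndsInvalid cs = false := by
  cases e : cs.getLast? with
  | none => simp [pvEndsInvalid, e]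
  | some a =>
    have : a ∈ cs := List.mem_of_getLast? e
    simp [pvEndsInvalid, e, h a this]

theorem pv_ends_of_nil_runs (cs : List Char) (h : pvRunsB cs = []) (hne : cs ≠ []) :
    pvEndsInvalid cs = true := by
  cases e : cs.getLast? with
  | none => exact absurd (List.getLast?_eq_none_iff.mp e) hne
  | some a =>
    have : a ∈ cs := List.mem_of_getLast? e
    simp [pvEndsInvalid, e, (pv_runs_nil cs).mp h a this]

theorem pv_T (cs : List Char) :
    (pvGA cs true).1 = PySem.Chars.join ['_'] (pvRunsB cs) ++ pvTailU cs := by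
  match cs with
  | [] => simp [pvGA, pvRunsB, pvTailU, PySem.Chars.join_nil]
  | c :: t =>
    by_cases h : pvValid c = true
    · -- a maximal valid run starts here
      have hsuf : t.dropWhile pvValid <:+ (c :: t) :=
        (List.dropWhile_suffix pvValid (l := t)).trans (List.suffix_cons c t)
      have hLHS : (pvGA (c :: t) true).1
          = c :: (t.takeWhile pvValid
              ++ (pvHeadU (t.dropWhile pvValid) ++ (pvGA (t.dropWhile pvValid) true).1)) := by
        simp [pvGA, h]
        rw [pv_run t, ← pv_F]
      have hruns : pvRunsB (c :: t)
          = (c :: t.takeWhile pvValid) :: pvRunsB (t.dropWhile pvValid) := by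
        rw [pvRunsB]; simp [h]
      by_cases hre : t.dropWhile pvValid = []
      · -- the whole string is one valid run
        have hall : ∀ x ∈ c :: t, pvValid x = true := by
          intro x hx
          rcases List.mem_cons.mp hx with rfl | hx
          · exact h
          · exact List.dropWhile_eq_nil_iff.mp hre x hx
        have hend := pv_ends_of_all _ hall
        rw [hLHS, hruns, hre]
        simp [pvGA, pvHeadU, pvRunsB, pvTailU, hend, PySem.Chars.join_singleton]
      · have hheadrest : pvHeadU (t.dropWhile pvValid) = ['_'] := by
          cases e : t.dropWhile pvValid with
          | nil => exact absurd e hre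
          | cons d ds =>
            have hd : pvValid d = false := by
              have := List.head_dropWhile_not pvValid (l := t) (by rw [e]; simp)
              simpa [e] using this
            simp [pvHeadU, hd]
        have hends : pvEndsInvalid (c :: t) = pvEndsInvalid (t.dropWhile pvValid) :=
          pv_ends_of_suffix _ _ hsuf hre
        have IH := pv_T (t.dropWhile pvValid)
        by_cases hrr : pvRunsB (t.dropWhile pvValid) = []
        · -- the rest is all invalid: it contributes exactly the stripped trailing '_'
          have hendr := pv_ends_of_nil_runs _ hrr hre
          have hga : (pvGA (t.dropWhile pvValid) true).1 = [] := by
            rw [IH, hrr]; simp [pvTailU, hrr, PySem.Chars.join_nil]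
          rw [hLHS, hruns, hrr, hga, hheadrest]
          simp [pvTailU, hruns, hrr, hends, hendr, PySem.Chars.join_singleton]
        · obtain ⟨r2, rs, hr2⟩ : ∃ r2 rs, pvRunsB (t.dropWhile pvValid) = r2 :: rs := by
            cases e : pvRunsB (t.dropWhile pvValid) with
            | nil => exact absurd e hrr
            | cons a l => exact ⟨a, l, rfl⟩
          have htail : pvTailU (c :: t) = pvTailU (t.dropWhile pvValid) := by
            simp [pvTailU, hruns, hr2, hends]
          rw [hLHS, hruns, hr2, hheadrest, IH, hr2, htail,
            PySem.Chars.join_cons_cons]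
          simp
    · -- invalid leading character: skipped by both sides
      have hLHS : (pvGA (c :: t) true).1 = (pvGA t true).1 := by simp [pvGA, h]
      have hruns : pvRunsB (c :: t) = pvRunsB t := by rw [pvRunsB]; simp [h]
      have htail : pvTailU (c :: t) = pvTailU t := by
        by_cases ht : t = []
        · simp [pvTailU, ht, pvRunsB, h]
        · rw [pvTailU, pvTailU, hruns,
            pv_ends_of_suffix (c :: t) t (List.suffix_cons c t) ht]
      rw [hLHS, pv_T t, hruns, htail]
termination_by cs.length
decreasing_by
  · exact Nat.lt_succ_of_le (List.length_dropWhile_le pvValid t)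
  · simp

theorem pv_strip_cons (xs : List Char) :
    PySem.Chars.stripChars ('_' :: xs) ['.', '_', '-']
      = PySem.Chars.stripChars xs ['.', '_', '-'] := by
  simp [PySem.Chars.stripChars]

theorem pv_dropWhile_snoc {α : Type} (p : α → Bool) (a : α) (hp : p a = true)
    (xs : List α) :
    List.dropWhile p (xs ++ [a])
      = if List.dropWhile p xs = [] then [] else List.dropWhile p xs ++ [a] := by
  induction xs with
  | nil => simp [hp]
  | cons c xs ih =>
    by_cases hc : p c = true
    · simp [hc, ih]
    · simp [hc]

theorem pv_strip_snoc (xs : List Char) :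
    PySem.Chars.stripChars (xs ++ ['_']) ['.', '_', '-']
      = PySem.Chars.stripChars xs ['.', '_', '-'] := by
  simp only [PySem.Chars.stripChars]
  rw [pv_dropWhile_snoc _ '_' (by decide)]
  by_cases h : List.dropWhile (fun c => (['.', '_', '-'] : List Char).contains c) xs = []
  · rw [if_pos h, h]
  · rw [if_neg h, List.reverse_append]
    simp only [List.reverse_cons, List.reverse_nil, List.nil_append, List.singleton_append,
      List.dropWhile_cons]
    rw [if_pos (by decide)]

theorem pv_strip_headU (cs xs : List Char) :
    PySem.Chars.stripChars (pvHeadU cs ++ xs) ['.', '_', '-']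
      = PySem.Chars.stripChars xs ['.', '_', '-'] := by
  match cs with
  | [] => simp [pvHeadU]
  | c :: t =>
    by_cases h : pvValid c = true
    · simp [pvHeadU, h]
    · simp [pvHeadU, h, pv_strip_cons]

theorem pv_strip_tailU (cs xs : List Char) :
    PySem.Chars.stripChars (xs ++ pvTailU cs) ['.', '_', '-']
      = PySem.Chars.stripChars xs ['.', '_', '-'] := by
  unfold pvTailU
  split_ifs with h1 h2
  · simp
  · exact pv_strip_snoc xs
  · simp

-- ===== VERDICT (by name: the statement is the Claim_ definition above) =====
theorem sanitize_path_segment_py_spec : Claim_equal_sanitize_path_segment_py := by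
  intro segment _
  unfold Spec_sanitize_path_segment_py
  unfold sanitize_path_segment_py sanitize_path_segment_py_alt
  rw [pv_foldA]
  simp only [List.nil_append]
  rw [pv_F, pv_T, pv_strip_headU, pv_strip_tailU]
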